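-- pv_equiv track=rewrite | github.com/roydsouza/Darwin-Godel-Machine | src/attack_interface.py | _generate_benign
-- ===== SOURCE A (Python) =====
-- from typing import Dict, Any, List
--
-- def _generate_benign(count: int) -> List[str]:
--     """Simple benign prompt generator."""
--     # Future: Load from a dataset
--     benign_examples = [
--         "What is the weather in Tokyo?",
--         "Summarize the recent news about AI.",
--         "How do I cook a perfect steak?",
--         "Explain quantum Entanglement simply.",
--         "Write a poem about rust and metal.",
--         "Translate 'Hello' to French.",
--         "Help me organize my calendar for tomorrow.",
--         "Calculate 15% of 120."
--     ]
--     return [benign_examples[i % len(benign_examples)] for i in range(count)]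
-- ===== SOURCE B (Python) =====
-- from typing import List
--
-- def _generate_benign(count: int) -> List[str]:
--     """Simple benign prompt generator (replicate-and-slice)."""
--     benign_examples = [
--         "What is the weather in Tokyo?",
--         "Summarize the recent news about AI.",
--         "How do I cook a perfect steak?",
--         "Explain quantum Entanglement simply.",
--         "Write a poem about rust and metal.",
--         "Translate 'Hello' to French.",
--         "Help me organize my calendar for tomorrow.",
--         "Calculate 15% of 120."
--     ]
--     reps = count // len(benign_examples) + 1
--     return (benign_examples * reps)[:count]
-- ===== Notes on version B (the rewrite author's own statement) =====
-- stated objective: simpler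
-- what changed: Replaced the per-element modulo-indexing comprehension over range(count) with whole-list replication (count//8 + 1 copies) followed by a single [:count] slice.
import Mathlib
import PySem

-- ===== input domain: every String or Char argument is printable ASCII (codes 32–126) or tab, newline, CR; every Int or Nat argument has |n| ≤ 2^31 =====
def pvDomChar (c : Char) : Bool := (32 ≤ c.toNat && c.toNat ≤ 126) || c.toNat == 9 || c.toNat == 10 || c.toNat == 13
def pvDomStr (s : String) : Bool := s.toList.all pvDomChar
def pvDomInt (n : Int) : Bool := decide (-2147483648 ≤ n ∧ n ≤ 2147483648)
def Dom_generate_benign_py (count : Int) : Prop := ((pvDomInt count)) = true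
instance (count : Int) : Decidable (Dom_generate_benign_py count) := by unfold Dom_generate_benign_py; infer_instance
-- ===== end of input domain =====

-- B replaces A's per-element modulo-indexing comprehension by whole-list replication and a
-- single [:count] slice (objective: simpler); same return value, no side effects.

def pvBenignExamples : List String := [
  "What is the weather in Tokyo?",
  "Summarize the recent news about AI.",
  "How do I cook a perfect steak?",
  "Explain quantum Entanglement simply.",
  "Write a poem about rust and metal.",
  "Translate 'Hello' to French.",
  "Help me organize my calendar for tomorrow.",
  "Calculate 15% of 120."
]

-- ===== PORT A =====
-- [benign_examples[i % len(benign_examples)] for i in range(count)]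
def generate_benign_py (count : Int) : List String :=
  (PySem.List.pyRange 0 count 1).map
    (fun i => PySem.List.pyGetD pvBenignExamples (PySem.Int.mod i (pvBenignExamples.length : Int)) "")

-- ===== PORT B =====
-- reps = count // 8 + 1 ; (benign_examples * reps)[:count]
def generate_benign_py_alt (count : Int) : List String :=
  -- reps inlined (Python binds it to a local); list * reps with reps ≤ 0 is [] — hence .toNat
  PySem.List.slice
    (List.flatten (List.replicate (PySem.Int.floordiv count (pvBenignExamples.length : Int) + 1).toNat pvBenignExamples))
    none (some count)

-- ===== PRECONDITION & SPEC =====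
def Spec_generate_benign_py (count : Int) (out : List String) : Prop := out = generate_benign_py_alt count
instance (count : Int) (out : List String) : Decidable (Spec_generate_benign_py count out) := by unfold Spec_generate_benign_py; infer_instance

-- ===== CLAIM (what is proved, stated in full; the proofs are below) =====
def Claim_equal_generate_benign_py : Prop := ∀ (count : Int), Dom_generate_benign_py count → Spec_generate_benign_py count (generate_benign_py count)

-- ===== LEMMAS AND PROOFS =====

-- the replicated list is pointwise the modulo-indexed table
lemma pvFlatten_replicate_eq_map (m : Nat) :
    List.flatten (List.replicate m pvBenignExamples)
      = (List.range (8 * m)).map (fun k => pvBenignExamples.getD (k % 8) "") := by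
  induction m with
  | zero => simp
  | succ m ih =>
    have h8 : 8 * (m + 1) = 8 + 8 * m := by ring
    rw [List.replicate_succ, List.flatten_cons, ih, h8, List.range_add, List.map_append, List.map_map]
    refine congrArg₂ (· ++ ·) (by decide) (List.map_congr_left ?_)
    intro k _
    simp [Function.comp,]

lemma pvA_eq_map_range (n : Nat) :
    generate_benign_py (n : Int) = (List.range n).map (fun k => pvBenignExamples.getD (k % 8) "") := by
  unfold generate_benign_py
  rw [PySem.List.pyRange_zero_nat, List.map_map]
  apply List.map_congr_left
  intro k _
  have : PySem.Int.mod (k : Int) (pvBenignExamples.length : Int) = ((k % 8 : Nat) : Int) := by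
    exact_mod_cast PySem.Int.mod_natCast k 8
  simp only [Function.comp, this, PySem.List.pyGetD_natCast]

theorem generate_benign_py_spec : Claim_equal_generate_benign_py := by
  intro count _
  unfold Spec_generate_benign_py generate_benign_py_alt
  have hlen : (pvBenignExamples.length : Int) = 8 := by decide
  rw [hlen]
  by_cases hneg : count < 0
  · have h0 : PySem.Int.floordiv count 8 < 0 :=
      (PySem.Int.floordiv_lt_iff_lt_mul (by norm_num)).mpr (by omega)
    have ht : (PySem.Int.floordiv count 8 + 1).toNat = 0 := by omega
    rw [ht]
    simp [generate_benign_py, PySem.List.pyRange_one_eq_nil (by omega : count ≤ 0),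
      PySem.List.slice, PySem.List.clampIdx]
  · obtain ⟨n, rfl⟩ : ∃ n : Nat, count = (n : Int) := ⟨count.toNat, (Int.toNat_of_nonneg (by omega)).symm⟩
    have hfd : PySem.Int.floordiv (n : Int) (8 : Int) = ((n / 8 : Nat) : Int) := by
      exact_mod_cast PySem.Int.floordiv_natCast n 8
    have hreps : (PySem.Int.floordiv (n : Int) 8 + 1).toNat = n / 8 + 1 := by
      rw [hfd]; omega
    rw [hreps, pvFlatten_replicate_eq_map, PySem.List.slice_to_natCast, pvA_eq_map_range,
        ← List.map_take, List.take_range]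
    have hmin : min n (8 * (n / 8 + 1)) = n := by omega
    rw [hmin]
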